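-- pv_equiv track=rewrite | github.com/mccabetrow/dragonfly_civil | etl/src/plaintiff_vendor_adapter.py | _map_simplicity_row
-- ===== SOURCE A (Python) =====
-- from typing import Any, Callable, Dict, Mapping, Optional, Sequence
--
-- CANONICAL_HEADERS = (
--     "PlaintiffName",
--     "FirmName",
--     "ContactName",
--     "ContactEmail",
--     "ContactPhone",
--     "TotalJudgmentAmount",
-- )
--
-- def _clean(value: Any) -> str:
--     if value is None:
--         return ""
--     return str(value).strip()
--
-- def _first_value(row: Mapping[str, Any], *keys: str) -> str:
--     for key in keys:
--         candidate = _clean(row.get(key))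
--         if candidate:
--             return candidate
--     return ""
--
-- def _map_simplicity_row(row: Mapping[str, Any]) -> Optional[Dict[str, str]]:
--     plaintiff_name = _first_value(
--         row,
--         "plaintiff_name",
--         "plaintiff",
--         "title",
--         "case_title",
--         "case_name",
--         "case_number",
--     )
--     if not plaintiff_name:
--         return None
--
--     firm_name = _first_value(
--         row, "firm_name", "law_firm", "organization", "organisation", "org_name"
--     )
--     contact_name = _first_value(
--         row, "plaintiff_contact", "contact_name", "primary_contact", "contact"
--     )
--     if not contact_name:
--         contact_name = plaintiff_name
--     contact_email = _first_value(row, "plaintiff_email", "contact_email", "email")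
--     contact_phone = _first_value(row, "plaintiff_phone", "contact_phone", "phone")
--     amount = _first_value(
--         row,
--         "judgment_amount",
--         "amount_awarded",
--         "total_judgment",
--         "total_judgment_amount",
--         "amount",
--     )
--
--     payload: Dict[str, str] = {
--         "PlaintiffName": plaintiff_name,
--         "FirmName": firm_name,
--         "ContactName": contact_name,
--         "ContactEmail": contact_email,
--         "ContactPhone": contact_phone,
--         "TotalJudgmentAmount": amount,
--     }
--
--     for header in CANONICAL_HEADERS:
--         payload.setdefault(header, "")
--     return payload
-- ===== SOURCE B (Python) =====
-- _FIELD_KEYS = (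
--     ("PlaintiffName", ("plaintiff_name", "plaintiff", "title", "case_title", "case_name", "case_number")),
--     ("FirmName", ("firm_name", "law_firm", "organization", "organisation", "org_name")),
--     ("ContactName", ("plaintiff_contact", "contact_name", "primary_contact", "contact")),
--     ("ContactEmail", ("plaintiff_email", "contact_email", "email")),
--     ("ContactPhone", ("plaintiff_phone", "contact_phone", "phone")),
--     ("TotalJudgmentAmount", ("judgment_amount", "amount_awarded", "total_judgment", "total_judgment_amount", "amount")),
-- )
--
-- # Reverse index: source key -> (canonical header, priority rank within that header's alias list).
-- _PRIORITY = {
--     key: (header, rank)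
--     for header, keys in _FIELD_KEYS
--     for rank, key in enumerate(keys)
-- }
--
-- _CANONICAL_HEADERS = tuple(header for header, _ in _FIELD_KEYS)
--
--
-- def _best_value(best, header):
--     return best[header][1] if header in best else ""
--
--
-- def _map_simplicity_row(row):
--     # One pass over the row: for each recognised key keep the lowest-rank non-empty value.
--     best = {}
--     for key, value in row.items():
--         slot = _PRIORITY.get(key)
--         if slot is None:
--             continue
--         header, rank = slot
--         text = "" if value is None else str(value).strip()
--         if not text:
--             continue
--         cur = best.get(header)
--         if cur is None or rank < cur[0]:
--             best[header] = (rank, text)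
--
--     plaintiff_name = _best_value(best, "PlaintiffName")
--     if not plaintiff_name:
--         return None
--     payload = {h: _best_value(best, h) for h in _CANONICAL_HEADERS}
--     if not payload["ContactName"]:
--         payload["ContactName"] = plaintiff_name
--     return payload
-- ===== Notes on version B (the rewrite author's own statement) =====
-- stated objective: alternative
-- what changed: Instead of scanning six candidate-key lists against the row (one _first_value call per field), B builds a reverse index key->(header,rank) once and makes a single pass over the row's items, keeping the lowest-rank non-empty value per header; Pre_ states the dict representation invariant (distinct keys), which every Python dict satisfies, so no Python-constructible input is excluded.
import Mathlib
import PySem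

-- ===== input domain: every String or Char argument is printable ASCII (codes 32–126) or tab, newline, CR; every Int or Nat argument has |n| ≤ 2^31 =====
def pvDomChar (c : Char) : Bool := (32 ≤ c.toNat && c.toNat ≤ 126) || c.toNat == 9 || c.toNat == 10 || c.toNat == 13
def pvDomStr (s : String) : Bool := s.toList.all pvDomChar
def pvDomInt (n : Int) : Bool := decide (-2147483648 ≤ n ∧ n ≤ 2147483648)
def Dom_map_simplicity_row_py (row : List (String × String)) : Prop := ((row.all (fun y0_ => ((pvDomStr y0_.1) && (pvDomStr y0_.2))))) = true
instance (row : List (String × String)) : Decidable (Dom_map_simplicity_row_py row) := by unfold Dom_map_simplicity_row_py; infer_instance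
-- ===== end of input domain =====

-- B replaces A's per-field scans over candidate-key lists by ONE pass over the row itself,
-- using a reverse index key -> (header, rank) and keeping the lowest-rank non-empty value
-- per header (objective: alternative; equal on rows with distinct keys = every Python dict).


-- ===== PORT A =====
-- _clean: None → "", else str(value).strip()  (values are strings on this domain)
def aClean (v : Option String) : String :=
  match v with
  | none => ""
  | some s => PySem.Str.strip s

-- _first_value: first key whose cleaned value is non-empty
def aFirstValue (row : List (String × String)) : List String → String
  | [] => ""
  | k :: ks =>
    let candidate := aClean (List.lookup k row)
    if candidate ≠ "" then candidate else aFirstValue row ks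

def aCanonicalHeaders : List String :=
  ["PlaintiffName", "FirmName", "ContactName", "ContactEmail", "ContactPhone", "TotalJudgmentAmount"]

def map_simplicity_row_py (row : List (String × String)) : Option (List (String × String)) :=
  let plaintiff_name := aFirstValue row
    ["plaintiff_name", "plaintiff", "title", "case_title", "case_name", "case_number"]
  if plaintiff_name = "" then none
  else
    let firm_name := aFirstValue row
      ["firm_name", "law_firm", "organization", "organisation", "org_name"]
    let contact_name0 := aFirstValue row
      ["plaintiff_contact", "contact_name", "primary_contact", "contact"]
    let contact_name := if contact_name0 = "" then plaintiff_name else contact_name0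
    let contact_email := aFirstValue row ["plaintiff_email", "contact_email", "email"]
    let contact_phone := aFirstValue row ["plaintiff_phone", "contact_phone", "phone"]
    let amount := aFirstValue row
      ["judgment_amount", "amount_awarded", "total_judgment", "total_judgment_amount", "amount"]
    let payload : List (String × String) :=
      [("PlaintiffName", plaintiff_name), ("FirmName", firm_name), ("ContactName", contact_name),
       ("ContactEmail", contact_email), ("ContactPhone", contact_phone), ("TotalJudgmentAmount", amount)]
    -- for header in CANONICAL_HEADERS: payload.setdefault(header, "")
    some (aCanonicalHeaders.foldl
      (fun d h => if (List.lookup h d).isSome then d else d ++ [(h, "")]) payload)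

-- ===== PORT B =====
def bFieldKeys : List (String × List String) :=
  [("PlaintiffName", ["plaintiff_name", "plaintiff", "title", "case_title", "case_name", "case_number"]),
   ("FirmName", ["firm_name", "law_firm", "organization", "organisation", "org_name"]),
   ("ContactName", ["plaintiff_contact", "contact_name", "primary_contact", "contact"]),
   ("ContactEmail", ["plaintiff_email", "contact_email", "email"]),
   ("ContactPhone", ["plaintiff_phone", "contact_phone", "phone"]),
   ("TotalJudgmentAmount", ["judgment_amount", "amount_awarded", "total_judgment", "total_judgment_amount", "amount"])]

-- _PRIORITY = {key: (header, rank) for header, keys in _FIELD_KEYS for rank, key in enumerate(keys)}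
def bPriority : PySem.Dict String (String × Int) :=
  (bFieldKeys.flatMap (fun p => (PySem.List.enumerate p.2).map (fun q => (q.2, (p.1, q.1))))).foldl
    (fun d kv => d.insert kv.1 kv.2) PySem.Dict.empty

def bCanonicalHeaders : List String := bFieldKeys.map Prod.fst

-- the body of B's single loop over row.items()
def bStep (best : PySem.Dict String (Int × String)) (kv : String × String) :
    PySem.Dict String (Int × String) :=
  match PySem.Dict.get? bPriority kv.1 with
  | none => best
  | some hr =>
    let text := PySem.Str.strip kv.2
    if text = "" then best
    else
      match PySem.Dict.get? best hr.1 with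
      | none => best.insert hr.1 (hr.2, text)
      | some cur => if hr.2 < cur.1 then best.insert hr.1 (hr.2, text) else best

-- best[h][1] if h in best else ""
def bBestVal (best : PySem.Dict String (Int × String)) (h : String) : String :=
  match PySem.Dict.get? best h with
  | some c => c.2
  | none => ""

def map_simplicity_row_py_alt (row : List (String × String)) : Option (List (String × String)) :=
  let best := row.foldl bStep PySem.Dict.empty
  let plaintiff_name := bBestVal best "PlaintiffName"
  if plaintiff_name = "" then none
  else
    let payload : List (String × String) :=
      bCanonicalHeaders.map (fun h => (h, bBestVal best h))
    if (List.lookup "ContactName" payload).getD "" = "" then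
      some (payload.map (fun q => if q.1 = "ContactName" then (q.1, plaintiff_name) else q))
    else some payload

-- ===== PRECONDITION & SPEC =====
-- Pre_ states the dict-representation invariant: a Python dict has distinct keys, so the
-- association list encoding a row has Nodup keys; no Python-constructible input is excluded.
def Pre_map_simplicity_row_py (row : List (String × String)) : Prop :=
  (row.map Prod.fst).Nodup
instance (row : List (String × String)) : Decidable (Pre_map_simplicity_row_py row) := by
  unfold Pre_map_simplicity_row_py; infer_instance

def pvWitness_map_simplicity_row_py : (List (String × String)) :=
  [("plaintiff_name", " Jane Doe "), ("amount", "12")]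

def Spec_map_simplicity_row_py (row : List (String × String)) (out : Option (List (String × String))) : Prop := out = map_simplicity_row_py_alt row
instance (row : List (String × String)) (out : Option (List (String × String))) : Decidable (Spec_map_simplicity_row_py row out) := by unfold Spec_map_simplicity_row_py; infer_instance

-- ===== CLAIM (what is proved, stated in full; the proofs are below) =====
def Claim_equal_map_simplicity_row_py : Prop := ∀ (row : List (String × String)), Dom_map_simplicity_row_py row → Pre_map_simplicity_row_py row → Spec_map_simplicity_row_py row (map_simplicity_row_py row)

-- ===== LEMMAS AND PROOFS =====

-- cleaned value of a key in the row, as A computes it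
def cleanAt (row : List (String × String)) (k : String) : String :=
  aClean (List.lookup k row)

-- the (rank, value) this row entry contributes to header h, if any
def bHit (h : String) (kv : String × String) : Option (Int × String) :=
  match PySem.Dict.get? bPriority kv.1 with
  | none => none
  | some hr =>
    if hr.1 = h ∧ PySem.Str.strip kv.2 ≠ "" then some (hr.2, PySem.Str.strip kv.2) else none

-- rank assigned by the reverse index to key k for header h
def bHdr (h : String) (k : String) : Option Int :=
  match PySem.Dict.get? bPriority k with
  | none => none
  | some hr => if hr.1 = h then some hr.2 else none

-- B's loop, projected to one header
def stepH (h : String) (acc : Option (Int × String)) (kv : String × String) :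
    Option (Int × String) :=
  match bHit h kv with
  | none => acc
  | some c =>
    match acc with
    | none => some c
    | some a => if c.1 < a.1 then some c else acc

-- best (rank, value) for header h among the row's entries (earliest wins ties)
def hitMin (h : String) : List (String × String) → Option (Int × String)
  | [] => none
  | kv :: r =>
    match bHit h kv with
    | none => hitMin h r
    | some c =>
      match hitMin h r with
      | none => some c
      | some m => if m.1 < c.1 then some m else some c

def mergeMin (acc m : Option (Int × String)) : Option (Int × String) :=
  match m with
  | none => acc
  | some c =>
    match acc with
    | none => some c
    | some a => if c.1 < a.1 then some c else some a

theorem get?_bStep (d : PySem.Dict String (Int × String)) (kv : String × String) (h : String) :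
    PySem.Dict.get? (bStep d kv) h = stepH h (PySem.Dict.get? d h) kv := by
  unfold bStep stepH bHit
  cases hp : PySem.Dict.get? bPriority kv.1 with
  | none => simp
  | some hr =>
    by_cases ht : PySem.Str.strip kv.2 = ""
    · simp [ht]
    · by_cases hh : hr.1 = h
      · subst hh
        cases hb : PySem.Dict.get? d hr.1 with
        | none => simp [ht, hb]
        | some cur =>
          by_cases hlt : hr.2 < cur.1 <;> simp [ht, hb, hlt]
      · cases hb : PySem.Dict.get? d hr.1 with
        | none => simp [ht, hh, hb, PySem.Dict.get?_insert, Ne.symm hh]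
        | some cur =>
          by_cases hlt : hr.2 < cur.1 <;>
            simp [ht, hh, hb, hlt, PySem.Dict.get?_insert, Ne.symm hh]

theorem get?_foldl_bStep (row : List (String × String)) (d : PySem.Dict String (Int × String))
    (h : String) :
    PySem.Dict.get? (row.foldl bStep d) h = row.foldl (stepH h) (PySem.Dict.get? d h) := by
  induction row generalizing d with
  | nil => rfl
  | cons kv r ih => simp only [List.foldl_cons, ih (bStep d kv), get?_bStep]

theorem foldl_stepH (h : String) (row : List (String × String)) (acc : Option (Int × String)) :
    row.foldl (stepH h) acc = mergeMin acc (hitMin h row) := by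
  induction row generalizing acc with
  | nil => cases acc <;> rfl
  | cons kv r ih =>
    simp only [List.foldl_cons, ih, hitMin]
    cases hc : bHit h kv with
    | none => simp [stepH, hc]
    | some c =>
      cases acc with
      | none =>
        cases hm : hitMin h r with
        | none => simp [stepH, hc, mergeMin]
        | some m =>
          simp only [stepH, hc]
          by_cases h2 : m.1 < c.1 <;> simp [h2, mergeMin]
      | some a =>
        cases hm : hitMin h r with
        | none =>
          simp only [stepH, hc]
          by_cases h1 : c.1 < a.1 <;> simp [h1, mergeMin]
        | some m =>
          simp only [stepH, hc]
          by_cases h1 : c.1 < a.1 <;> by_cases h2 : m.1 < c.1 <;>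
            simp only [h1, h2, if_pos, if_neg, not_false_iff, mergeMin] <;>
            split_ifs <;> first | rfl | omega


theorem lookup_ne_none_of_mem {β : Type} (l : List (String × β)) (p : String × β) (hp : p ∈ l) :
    List.lookup p.1 l ≠ none := by
  induction l with
  | nil => simp at hp
  | cons q l ih =>
    rcases List.mem_cons.mp hp with h | h
    · simp [h, List.lookup]
    · by_cases hk : p.1 = q.1
      · have hbe : (p.1 == q.1) = true := beq_iff_eq.mpr hk
        simp [List.lookup, hbe]
      · have hbe : (p.1 == q.1) = false := beq_eq_false_iff_ne.mpr hk
        simpa [List.lookup, hbe] using ih h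

theorem mem_of_lookup_eq_some {β : Type} (l : List (String × β)) (k : String) (b : β)
    (h : List.lookup k l = some b) : (k, b) ∈ l := by
  induction l with
  | nil => simp [List.lookup] at h
  | cons q l ih =>
    by_cases hk : k = q.1
    · have hbe : (k == q.1) = true := beq_iff_eq.mpr hk
      simp [List.lookup, hbe] at h
      exact List.mem_cons.mpr (Or.inl (by simp [hk, ← h]))
    · have hbe : (k == q.1) = false := beq_eq_false_iff_ne.mpr hk
      simp only [List.lookup, hbe] at h
      exact List.mem_cons.mpr (Or.inr (ih h))

theorem lookup_eq_of_mem_nodup {β : Type} (l : List (String × β))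
    (hnd : (l.map Prod.fst).Nodup) (k : String) (b : β) (hm : (k, b) ∈ l) :
    List.lookup k l = some b := by
  induction l with
  | nil => simp at hm
  | cons q l ih =>
    simp only [List.map_cons, List.nodup_cons] at hnd
    rcases List.mem_cons.mp hm with h | h
    · simp [← h, List.lookup]
    · have hne : k ≠ q.1 := fun heq => hnd.1 (List.mem_map.mpr ⟨(k, b), h, heq⟩)
      have hbe : (k == q.1) = false := beq_eq_false_iff_ne.mpr hne
      simpa [List.lookup, hbe] using ih hnd.2 h

theorem cleanAt_cons_self (k0 v : String) (r : List (String × String)) :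
    cleanAt ((k0, v) :: r) k0 = PySem.Str.strip v := by
  simp [cleanAt, List.lookup, aClean]

theorem cleanAt_cons_ne (k k0 v : String) (r : List (String × String)) (hne : k ≠ k0) :
    cleanAt ((k0, v) :: r) k = cleanAt r k := by
  have hbe : (k == k0) = false := beq_eq_false_iff_ne.mpr hne
  simp [cleanAt, List.lookup, hbe]

theorem mem_keys_of_cleanAt_ne (r : List (String × String)) (k : String)
    (hc : cleanAt r k ≠ "") : k ∈ r.map Prod.fst := by
  cases hl : List.lookup k r with
  | none => simp [cleanAt, hl, aClean] at hc
  | some v => exact List.mem_map.mpr ⟨(k, v), mem_of_lookup_eq_some r k v hl, rfl⟩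

theorem bHit_none_strip (h : String) (rk : List (String × Int))
    (hch : ∀ k, bHdr h k = List.lookup k rk) (k0 v : String)
    (hb : bHit h (k0, v) = none) (j0 : Int) (hl : List.lookup k0 rk = some j0) :
    PySem.Str.strip v = "" := by
  have hh : bHdr h k0 = some j0 := by rw [hch k0, hl]
  unfold bHdr at hh
  unfold bHit at hb
  cases hp : PySem.Dict.get? bPriority k0 with
  | none => rw [hp] at hh; simp at hh
  | some hr =>
    rw [hp] at hh hb
    by_cases hhr : hr.1 = h
    · simp only [hhr, true_and, ne_eq, ite_not] at hb
      by_contra hs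
      simp [hs] at hb
    · simp [hhr] at hh

theorem bHit_some_spec (h k0 v : String) (c : Int × String) (hb : bHit h (k0, v) = some c) :
    bHdr h k0 = some c.1 ∧ c.2 = PySem.Str.strip v ∧ c.2 ≠ "" := by
  unfold bHit at hb
  unfold bHdr
  cases hp : PySem.Dict.get? bPriority k0 with
  | none => rw [hp] at hb; simp at hb
  | some hr =>
    simp only [hp] at hb
    by_cases hc : hr.1 = h ∧ PySem.Str.strip v ≠ ""
    · rw [if_pos hc] at hb
      obtain ⟨h1, h2⟩ := hc
      cases hb
      simp [h1, h2]
    · rw [if_neg hc] at hb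
      simp at hb

theorem hitMin_none_spec (h : String) (rk : List (String × Int))
    (hch : ∀ k, bHdr h k = List.lookup k rk)
    (row : List (String × String)) (hm : hitMin h row = none) :
    ∀ p ∈ rk, cleanAt row p.1 = "" := by
  induction row with
  | nil => intro p _; simp [cleanAt, List.lookup, aClean]
  | cons kv r ih =>
    obtain ⟨k0, v⟩ := kv
    have hb : bHit h (k0, v) = none := by
      unfold hitMin at hm
      cases hb : bHit h (k0, v) with
      | none => rfl
      | some c =>
        rw [hb] at hm
        cases hm2 : hitMin h r <;> simp only [hm2] at hm <;> (try split at hm) <;> simp at hm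
    have hmr : hitMin h r = none := by
      unfold hitMin at hm
      rwa [hb] at hm
    intro p hp
    by_cases hk : p.1 = k0
    · obtain ⟨j0, hj0⟩ := Option.ne_none_iff_exists'.mp
        (hk ▸ lookup_ne_none_of_mem rk p hp)
      rw [hk, cleanAt_cons_self]
      exact bHit_none_strip h rk hch k0 v hb j0 (hk ▸ hj0)
    · rw [cleanAt_cons_ne p.1 k0 v r hk]
      exact ih hmr p hp

theorem hitMin_some_spec (h : String) (rk : List (String × Int))
    (hch : ∀ k, bHdr h k = List.lookup k rk) (hkeys : (rk.map Prod.fst).Nodup)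
    (row : List (String × String)) (hrow : (row.map Prod.fst).Nodup)
    (j : Int) (u : String) (hm : hitMin h row = some (j, u)) :
    u ≠ "" ∧ (∃ k, (k, j) ∈ rk ∧ cleanAt row k = u) ∧
      (∀ p ∈ rk, p.2 < j → cleanAt row p.1 = "") := by
  induction row generalizing j u with
  | nil => simp [hitMin] at hm
  | cons kv r ih =>
    obtain ⟨k0, v⟩ := kv
    simp only [List.map_cons, List.nodup_cons] at hrow
    have hk0r : k0 ∉ r.map Prod.fst := hrow.1
    have hndr : (r.map Prod.fst).Nodup := hrow.2
    -- a key whose clean value in r is non-empty is a key of r, hence ≠ k0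
    have lift : ∀ k, cleanAt r k ≠ "" → k ≠ k0 := by
      intro k hk heq
      exact hk0r (heq ▸ mem_keys_of_cleanAt_ne r k hk)
    unfold hitMin at hm
    cases hb : bHit h (k0, v) with
    | none =>
      simp only [hb] at hm
      obtain ⟨hne, ⟨k, hkrk, hcl⟩, hmin⟩ := ih hndr j u hm
      have hkk0 : k ≠ k0 := lift k (hcl ▸ hne)
      refine ⟨hne, ⟨k, hkrk, by rw [cleanAt_cons_ne k k0 v r hkk0]; exact hcl⟩, ?_⟩
      intro p hp hpj
      by_cases hk : p.1 = k0
      · obtain ⟨j0, hj0⟩ := Option.ne_none_iff_exists'.mp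
          (hk ▸ lookup_ne_none_of_mem rk p hp)
        rw [hk, cleanAt_cons_self]
        exact bHit_none_strip h rk hch k0 v hb j0 (hk ▸ hj0)
      · rw [cleanAt_cons_ne p.1 k0 v r hk]
        exact hmin p hp hpj
    | some c =>
      simp only [hb] at hm
      obtain ⟨hhd, hcv, hcne⟩ := bHit_some_spec h k0 v c hb
      have hlk0 : List.lookup k0 rk = some c.1 := by rw [← hch k0]; exact hhd
      have hk0mem : (k0, c.1) ∈ rk := mem_of_lookup_eq_some rk k0 c.1 hlk0
      -- any rk entry with key k0 has rank c.1
      have hrank : ∀ p ∈ rk, p.1 = k0 → p.2 = c.1 := by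
        intro p hp hpk
        have h2 := lookup_eq_of_mem_nodup rk hkeys k0 p.2 (by rw [← hpk]; exact hp)
        rw [hlk0] at h2
        exact (Option.some_inj.mp h2).symm
      cases hm2 : hitMin h r with
      | none =>
        simp only [hm2] at hm
        cases hm
        refine ⟨hcne, ⟨k0, hk0mem, by rw [cleanAt_cons_self]; exact hcv.symm⟩, ?_⟩
        intro p hp hpj
        by_cases hk : p.1 = k0
        · exact absurd (hrank p hp hk) (by omega)
        · rw [cleanAt_cons_ne p.1 k0 v r hk]
          exact hitMin_none_spec h rk hch r hm2 p hp
      | some m =>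
        simp only [hm2] at hm
        by_cases hlt : m.1 < c.1
        · rw [if_pos hlt] at hm
          obtain ⟨hne, ⟨k, hkrk, hcl⟩, hmin⟩ := ih hndr j u (hm ▸ hm2)
          have hkk0 : k ≠ k0 := lift k (hcl ▸ hne)
          refine ⟨hne, ⟨k, hkrk, by rw [cleanAt_cons_ne k k0 v r hkk0]; exact hcl⟩, ?_⟩
          intro p hp hpj
          by_cases hk : p.1 = k0
          · -- rank of k0 is c.1; but p.2 < j = m.1 < c.1, contradiction
            have : p.2 = c.1 := hrank p hp hk
            have : m.1 = j := by cases hm; rfl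
            omega
          · rw [cleanAt_cons_ne p.1 k0 v r hk]
            exact hmin p hp hpj
        · rw [if_neg hlt] at hm
          cases hm
          obtain ⟨hne', ⟨k', hkrk', hcl'⟩, hmin'⟩ := ih hndr m.1 m.2 (by rw [hm2])
          refine ⟨hcne, ⟨k0, hk0mem, by rw [cleanAt_cons_self]; exact hcv.symm⟩, ?_⟩
          intro p hp hpj
          by_cases hk : p.1 = k0
          · exact absurd (hrank p hp hk) (by omega)
          · rw [cleanAt_cons_ne p.1 k0 v r hk]
            exact hmin' p hp (by omega)

theorem aFirstValue_of_empty (row : List (String × String)) (rk : List (String × Int))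
    (hall : ∀ p ∈ rk, cleanAt row p.1 = "") :
    aFirstValue row (rk.map Prod.fst) = "" := by
  induction rk with
  | nil => rfl
  | cons p rk ih =>
    have hp := hall p (by simp)
    simp only [List.map_cons, aFirstValue, cleanAt] at *
    simp [hp, ih (fun q hq => hall q (by simp [hq]))]

theorem aFirstValue_of_hit (row : List (String × String)) (rk : List (String × Int))
    (hsort : List.Pairwise (fun p q => p.2 < q.2) rk) (j : Int) (u : String) (k : String)
    (hmem : (k, j) ∈ rk) (hval : cleanAt row k = u) (hne : u ≠ "")
    (hmin : ∀ p ∈ rk, p.2 < j → cleanAt row p.1 = "") :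
    aFirstValue row (rk.map Prod.fst) = u := by
  induction rk with
  | nil => simp at hmem
  | cons p rk ih =>
    simp only [List.map_cons, aFirstValue]
    rcases List.mem_cons.mp hmem with h | h
    · have : cleanAt row p.1 = u := by rw [← h]; exact hval
      simp only [cleanAt] at this
      simp [this, hne]
    · have hpj : p.2 < j := (List.pairwise_cons.mp hsort).1 (k, j) h
      have hpc : cleanAt row p.1 = "" := hmin p (List.mem_cons_self) hpj
      simp only [cleanAt] at hpc
      simp only [hpc, ne_eq, not_true_eq_false]
      exact ih (List.pairwise_cons.mp hsort).2 h (fun q hq hqj => hmin q (List.mem_cons.mpr (Or.inr hq)) hqj)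


def prioLit : List (String × (String × Int)) :=
  [("plaintiff_name",("PlaintiffName",0)),("plaintiff",("PlaintiffName",1)),("title",("PlaintiffName",2)),
   ("case_title",("PlaintiffName",3)),("case_name",("PlaintiffName",4)),("case_number",("PlaintiffName",5)),
   ("firm_name",("FirmName",0)),("law_firm",("FirmName",1)),("organization",("FirmName",2)),
   ("organisation",("FirmName",3)),("org_name",("FirmName",4)),
   ("plaintiff_contact",("ContactName",0)),("contact_name",("ContactName",1)),("primary_contact",("ContactName",2)),("contact",("ContactName",3)),
   ("plaintiff_email",("ContactEmail",0)),("contact_email",("ContactEmail",1)),("email",("ContactEmail",2)),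
   ("plaintiff_phone",("ContactPhone",0)),("contact_phone",("ContactPhone",1)),("phone",("ContactPhone",2)),
   ("judgment_amount",("TotalJudgmentAmount",0)),("amount_awarded",("TotalJudgmentAmount",1)),
   ("total_judgment",("TotalJudgmentAmount",2)),("total_judgment_amount",("TotalJudgmentAmount",3)),("amount",("TotalJudgmentAmount",4))]

set_option maxHeartbeats 2000000 in
theorem bPriority_eq : bPriority = PySem.Dict.mk prioLit := by rfl

theorem get?_mk_eq_lookup {β : Type} (l : List (String × β)) (k : String) :
    (PySem.Dict.mk l).get? k = List.lookup k l := by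
  induction l with
  | nil => rfl
  | cons q l ih =>
    rw [show (PySem.Dict.mk (q :: l)) = (PySem.Dict.mk ((q.1, q.2) :: l)) from rfl,
      PySem.Dict.get?_mk_cons, List.lookup]
    by_cases hk : k = q.1
    · simp [hk]
    · have h1 : (q.1 == k) = false := beq_eq_false_iff_ne.mpr (Ne.symm hk)
      have h2 : (k == q.1) = false := beq_eq_false_iff_ne.mpr hk
      simp [h1, h2, ih]

def gHdr (h : String) (b : String × Int) : Option Int := if b.1 = h then some b.2 else none

def rkOf (h : String) : List (String × Int) :=
  prioLit.filterMap (fun p => (gHdr h p.2).map (fun c => (p.1, c)))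

theorem lookup_filterMap {β γ : Type} (l : List (String × β)) (g : β → Option γ) (k : String)
    (hnd : (l.map Prod.fst).Nodup) :
    List.lookup k (l.filterMap (fun p => (g p.2).map (fun c => (p.1, c)))) =
      (List.lookup k l).bind g := by
  induction l with
  | nil => rfl
  | cons q l ih =>
    obtain ⟨a, b⟩ := q
    simp only [List.map_cons, List.nodup_cons] at hnd
    rw [List.filterMap_cons]
    by_cases hk : k = a
    · have hbe : (k == a) = true := beq_iff_eq.mpr hk
      have hnone : List.lookup k l = none := by
        cases hl : List.lookup k l with
        | none => rfl
        | some c' =>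
          exact absurd (List.mem_map.mpr ⟨(k, c'), mem_of_lookup_eq_some l k c' hl, hk⟩) hnd.1
      cases hg : g b with
      | none => simp [List.lookup, hbe, hg, ih hnd.2, hnone]
      | some c => simp [List.lookup, hbe, hg]
    · have hbe : (k == a) = false := beq_eq_false_iff_ne.mpr hk
      cases hg : g b with
      | none => simp [List.lookup, hbe, ih hnd.2]
      | some c => simp [List.lookup, hbe, ih hnd.2]

theorem bHdr_eq_lookup (h k : String) : bHdr h k = List.lookup k (rkOf h) := by
  have h1 : bHdr h k = (PySem.Dict.get? bPriority k).bind (gHdr h) := by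
    unfold bHdr gHdr
    cases PySem.Dict.get? bPriority k <;> rfl
  rw [h1, bPriority_eq, get?_mk_eq_lookup, rkOf,
    lookup_filterMap prioLit (gHdr h) k (by decide)]

-- per-header master lemma: B's fold projected to h computes A's scan over h's key list
theorem header_value (h : String) (rk : List (String × Int))
    (hch : ∀ k, bHdr h k = List.lookup k rk) (hkeys : (rk.map Prod.fst).Nodup)
    (hsort : List.Pairwise (fun p q => p.2 < q.2) rk)
    (row : List (String × String)) (hrow : (row.map Prod.fst).Nodup) :
    bBestVal (row.foldl bStep PySem.Dict.empty) h = aFirstValue row (rk.map Prod.fst) := by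
  unfold bBestVal
  rw [get?_foldl_bStep, PySem.Dict.get?_empty, foldl_stepH]
  cases hm : hitMin h row with
  | none => simpa [mergeMin] using (aFirstValue_of_empty row rk (hitMin_none_spec h rk hch row hm)).symm
  | some c =>
    obtain ⟨j, u⟩ := c
    obtain ⟨hne, ⟨k, hk, hv⟩, hmin⟩ := hitMin_some_spec h rk hch hkeys row hrow j u hm
    simpa [mergeMin] using (aFirstValue_of_hit row rk hsort j u k hk hv hne hmin).symm

-- ===== VERDICT (by name: the statement is the Claim_ definition above) =====
theorem map_simplicity_row_py_spec : Claim_equal_map_simplicity_row_py := by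
  intro row _ hrow
  unfold Pre_map_simplicity_row_py at hrow
  unfold Spec_map_simplicity_row_py map_simplicity_row_py map_simplicity_row_py_alt
  have hPN := header_value "PlaintiffName" (rkOf "PlaintiffName")
    (bHdr_eq_lookup "PlaintiffName") (by decide) (by decide) row hrow
  have hFN := header_value "FirmName" (rkOf "FirmName")
    (bHdr_eq_lookup "FirmName") (by decide) (by decide) row hrow
  have hCN := header_value "ContactName" (rkOf "ContactName")
    (bHdr_eq_lookup "ContactName") (by decide) (by decide) row hrow
  have hCE := header_value "ContactEmail" (rkOf "ContactEmail")
    (bHdr_eq_lookup "ContactEmail") (by decide) (by decide) row hrow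
  have hCP := header_value "ContactPhone" (rkOf "ContactPhone")
    (bHdr_eq_lookup "ContactPhone") (by decide) (by decide) row hrow
  have hTA := header_value "TotalJudgmentAmount" (rkOf "TotalJudgmentAmount")
    (bHdr_eq_lookup "TotalJudgmentAmount") (by decide) (by decide) row hrow
  rw [show (rkOf "PlaintiffName").map Prod.fst =
    ["plaintiff_name", "plaintiff", "title", "case_title", "case_name", "case_number"] from by decide] at hPN
  rw [show (rkOf "FirmName").map Prod.fst =
    ["firm_name", "law_firm", "organization", "organisation", "org_name"] from by decide] at hFN
  rw [show (rkOf "ContactName").map Prod.fst =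
    ["plaintiff_contact", "contact_name", "primary_contact", "contact"] from by decide] at hCN
  rw [show (rkOf "ContactEmail").map Prod.fst =
    ["plaintiff_email", "contact_email", "email"] from by decide] at hCE
  rw [show (rkOf "ContactPhone").map Prod.fst =
    ["plaintiff_phone", "contact_phone", "phone"] from by decide] at hCP
  rw [show (rkOf "TotalJudgmentAmount").map Prod.fst =
    ["judgment_amount", "amount_awarded", "total_judgment", "total_judgment_amount", "amount"] from by decide] at hTA
  simp only [bCanonicalHeaders, bFieldKeys, List.map_cons, List.map_nil, hPN, hFN, hCN, hCE, hCP, hTA]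
  by_cases hp : aFirstValue row
      ["plaintiff_name", "plaintiff", "title", "case_title", "case_name", "case_number"] = ""
  · simp [hp]
  · by_cases hc : aFirstValue row
        ["plaintiff_contact", "contact_name", "primary_contact", "contact"] = "" <;>
      simp [hp, hc, aCanonicalHeaders, List.lookup]
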